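-- pv_equiv track=rewrite | github.com/valentin-correa/UTN-2024 | UTN/1er año/AyED/Python/Problema 19.5.py | palA
-- ===== SOURCE A (Python) =====
-- def palA(cadena):
--     x = False
--     cadena_a = ""
--     for i in range(len(cadena)):
--         if (cadena[i] == "a" or cadena[i] == "A") and (cadena[i-1] == " " or i == 0):
--             x = True
--         if x == True:
--             cadena_a += cadena[i]
--         if cadena[i] == " ":
--             x = False
--
--
--     return cadena_a
-- ===== SOURCE B (Python) =====
-- def _go(toks):
--     if not toks:
--         return ""
--     t, rest = toks[0], toks[1:]
--     ok = bool(t) and t[0] in ("a", "A")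
--     if not rest:
--         return t if ok else ""
--     return (t + " " if ok else "") + _go(rest)
--
--
-- def palA(cadena):
--     return _go(cadena.split(" "))
-- ===== Notes on version B (the rewrite author's own statement) =====
-- stated objective: simpler
-- what changed: Replaced the character-by-character on/off flag state machine (with its cadena[i-1] lookback and one-char string appends) by a word-level recursion: split the string on single spaces, keep each token whose first letter qualifies, appending one space after it unless it is the last token.
import Mathlib
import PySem

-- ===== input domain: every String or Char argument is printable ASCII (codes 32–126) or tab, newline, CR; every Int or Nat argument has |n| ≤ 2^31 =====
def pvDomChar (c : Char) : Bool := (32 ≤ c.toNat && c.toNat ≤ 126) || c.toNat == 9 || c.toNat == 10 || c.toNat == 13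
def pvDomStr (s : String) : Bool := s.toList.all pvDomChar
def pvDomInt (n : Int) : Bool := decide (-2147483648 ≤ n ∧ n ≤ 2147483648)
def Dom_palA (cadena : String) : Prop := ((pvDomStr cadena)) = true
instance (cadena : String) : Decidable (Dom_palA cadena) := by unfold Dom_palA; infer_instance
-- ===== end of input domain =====

-- B replaces A's per-character on/off flag machine by a word-level split-filter recursion; objective: simpler.

-- ===== PORT A =====
-- one iteration of A's for-loop body: state = (x, cadena_a)
def stepA (cs : List Char) (st : Bool × List Char) (i : Int) : Bool × List Char :=
  let c := PySem.List.pyGetD cs i ' '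
  let x1 : Bool := if (c = 'a' ∨ c = 'A') ∧ (PySem.List.pyGetD cs (i - 1) ' ' = ' ' ∨ i = 0) then true else st.1
  let acc := if x1 = true then st.2 ++ [c] else st.2
  let x2 : Bool := if c = ' ' then false else x1
  (x2, acc)

def palA (cadena : String) : String :=
  let cs := cadena.toList
  let r := (PySem.List.pyRange 0 cs.length 1).foldl (stepA cs) (false, [])
  String.ofList r.2

-- ===== PORT B =====
-- _go from Source B: recursion over the token list
def goB : List (List Char) → List Char
  | [] => []
  | t :: rest =>
    let ok : Bool := match t with
      | [] => false
      | c :: _ => decide (c = 'a' ∨ c = 'A')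
    match rest with
    | [] => if ok then t else []
    | _ :: _ => (if ok then t ++ [' '] else []) ++ goB rest

def palA_alt (cadena : String) : String :=
  String.ofList (goB (PySem.Chars.splitOn cadena.toList [' ']))

-- ===== PRECONDITION & SPEC =====
def Spec_palA (cadena : String) (out : String) : Prop := out = palA_alt cadena
instance (cadena : String) (out : String) : Decidable (Spec_palA cadena out) := by unfold Spec_palA; infer_instance

-- ===== CLAIM (what is proved, stated in full; the proofs are below) =====
def Claim_equal_palA : Prop := ∀ (cadena : String), Dom_palA cadena → Spec_palA cadena (palA cadena)

-- ===== LEMMAS AND PROOFS =====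

-- structural reformulation of A's loop: state x, p = "previous char was a space, or we are at index 0"
def loopA : List Char → Bool → Bool → Bool × List Char
  | [], x, _ => (x, [])
  | c :: cs, x, p =>
    let x1 : Bool := if (c = 'a' ∨ c = 'A') ∧ p = true then true else x
    let x2 : Bool := if c = ' ' then false else x1
    let r := loopA cs x2 (decide (c = ' '))
    (r.1, (if x1 = true then [c] else []) ++ r.2)

def pPrev (cs : List Char) (k : Nat) : Bool :=
  if k = 0 then true else decide (cs[k-1]? = some ' ')

def mySplit : List Char → List (List Char)
  | [] => [[]]
  | c :: cs =>
    if c = ' ' then [] :: mySplit cs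
    else
      match mySplit cs with
      | [] => [[c]]
      | t :: ts => (c :: t) :: ts

lemma mySplit_ne_nil (cs : List Char) : mySplit cs ≠ [] := by
  cases cs with
  | nil => simp [mySplit]
  | cons c cs =>
    simp only [mySplit]
    split
    · simp
    · split <;> simp

lemma go_eq (fuel : Nat) (l cur : List Char) (acc : List (List Char)) (h : l.length < fuel) :
    PySem.Chars.splitOn.go [' '] fuel l cur acc
      = acc.reverse ++ (match mySplit l with
          | [] => [cur.reverse]
          | t :: ts => (cur.reverse ++ t) :: ts) := by
  induction fuel generalizing l cur acc with
  | zero => omega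
  | succ n ih =>
    cases l with
    | nil => simp [PySem.Chars.splitOn.go, mySplit]
    | cons c rest =>
      rw [PySem.Chars.splitOn.go]
      by_cases hc : c = ' '
      · subst hc
        have hp : List.isPrefixOf [' '] (' ' :: rest) = true := by simp [List.isPrefixOf]
        rw [if_pos hp]
        rw [ih _ _ _ (by simp at h ⊢; omega)]
        simp [mySplit]
        cases hm : mySplit rest with
        | nil => exact absurd hm (mySplit_ne_nil rest)
        | cons t ts => simp
      · have hp : List.isPrefixOf [' '] (c :: rest) = false := by
          simp [List.isPrefixOf]; exact fun hh => (hc hh.symm).elim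
        rw [if_neg (by simp [hp])]
        rw [ih _ _ _ (by simp at h ⊢; omega)]
        simp only [mySplit, if_neg hc]
        cases hm : mySplit rest with
        | nil => exact absurd hm (mySplit_ne_nil rest)
        | cons t ts => simp

lemma splitOn_eq_mySplit (cs : List Char) :
    PySem.Chars.splitOn cs [' '] = mySplit cs := by
  unfold PySem.Chars.splitOn
  rw [go_eq _ _ _ _ (by omega)]
  cases hm : mySplit cs with
  | nil => exact absurd hm (mySplit_ne_nil cs)
  | cons t ts => simp

lemma bridge (cs : List Char) (k : Nat) (hk : k ≤ cs.length) (x : Bool) (acc : List Char) :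
    (PySem.List.pyRange (k : Int) (cs.length : Int) 1).foldl (stepA cs) (x, acc)
      = ((loopA (cs.drop k) x (pPrev cs k)).1, acc ++ (loopA (cs.drop k) x (pPrev cs k)).2) := by
  induction h : cs.length - k generalizing k x acc with
  | zero =>
    have hkl : k = cs.length := by omega
    subst hkl
    rw [PySem.List.pyRange_one_eq_nil (by omega)]
    simp [loopA]
  | succ n ih =>
    have hlt : k < cs.length := by omega
    rw [PySem.List.pyRange_one_cons (by exact_mod_cast hlt)]
    rw [List.foldl_cons]
    have hget : PySem.List.pyGetD cs (k : Int) ' ' = cs[k] := by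
      rw [PySem.List.pyGetD_of_nonneg]
      · simp [List.getD_eq_getElem?_getD, List.getElem?_eq_getElem hlt]
      · omega
    have hdrop : cs.drop k = cs[k] :: cs.drop (k+1) := List.drop_eq_getElem_cons hlt
    have hcond : ((PySem.List.pyGetD cs ((k : Int) - 1) ' ' = ' ' ∨ (k : Int) = 0)) ↔ (pPrev cs k = true) := by
      unfold pPrev
      by_cases hk0 : k = 0
      · subst hk0; simp
      · have h1 : ((k : Int) - 1) = ((k - 1 : Nat) : Int) := by omega
        rw [h1, PySem.List.pyGetD_of_nonneg]
        · have hlt2 : k - 1 < cs.length := by omega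
          simp [hk0, List.getD_eq_getElem?_getD, List.getElem?_eq_getElem hlt2]
        · omega
    have hstep : stepA cs (x, acc) (k : Int)
        = (if cs[k] = ' ' then false else (if (cs[k] = 'a' ∨ cs[k] = 'A') ∧ pPrev cs k = true then true else x),
           acc ++ (if (if (cs[k] = 'a' ∨ cs[k] = 'A') ∧ pPrev cs k = true then true else x) = true then [cs[k]] else [])) := by
      unfold stepA
      simp only [hget, hcond]
      split <;> simp
      all_goals split <;> simp
    have hc1 : ((k : Int) + 1) = ((k + 1 : Nat) : Int) := by omega
    rw [hstep, hc1, ih (k+1) (by omega) _ _ (by omega)]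
    have hp1 : pPrev cs (k+1) = decide (cs[k] = ' ') := by
      unfold pPrev
      simp [List.getElem?_eq_getElem hlt]
    rw [hdrop]
    simp only [loopA, hp1]
    split <;> split <;> simp

lemma loopA_word (w : List Char) (hw : ∀ c ∈ w, c ≠ ' ') (x : Bool) (rest : List Char) :
    loopA (w ++ rest) x false
      = ((loopA rest x false).1, (if x = true then w else []) ++ (loopA rest x false).2) := by
  induction w with
  | nil => simp
  | cons c w ih =>
    have hc : c ≠ ' ' := hw c (by simp)
    simp only [List.cons_append, loopA]
    simp only [Bool.false_eq_true, and_false, if_false, if_neg hc, decide_eq_false hc]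
    rw [ih (fun d hd => hw d (by simp [hd]))]
    simp
    split <;> simp

lemma loopA_spacefree (w : List Char) (hw : ∀ c ∈ w, c ≠ ' ') (x : Bool) :
    loopA w x false = (x, if x = true then w else []) := by
  have h := loopA_word w hw x []
  rw [List.append_nil] at h
  simpa [loopA] using h

lemma dropWhile_head_false {p : Char → Bool} :
    ∀ (cs : List Char) (d : Char) (r' : List Char), cs.dropWhile p = d :: r' → p d = false := by
  intro cs
  induction cs with
  | nil => intro d r' h; simp [List.dropWhile] at h
  | cons c cs ih =>
    intro d r' h
    rw [List.dropWhile_cons] at h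
    by_cases hp : p c = true
    · exact ih d r' (by simpa [hp] using h)
    · have hcc : c :: cs = d :: r' := by simpa [hp] using h
      obtain ⟨h1, -⟩ := List.cons.inj hcc
      rw [← h1]
      simpa using hp

lemma mySplit_spacefree (w : List Char) (hw : ∀ c ∈ w, c ≠ ' ') : mySplit w = [w] := by
  induction w with
  | nil => rfl
  | cons c w ih =>
    have hc : c ≠ ' ' := hw c (by simp)
    simp only [mySplit, if_neg hc, ih (fun d hd => hw d (by simp [hd]))]

lemma mySplit_append (w rest : List Char) (hw : ∀ c ∈ w, c ≠ ' ') :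
    mySplit (w ++ ' ' :: rest) = w :: mySplit rest := by
  induction w with
  | nil => simp [mySplit]
  | cons c w ih =>
    have hc : c ≠ ' ' := hw c (by simp)
    simp only [List.cons_append, mySplit, if_neg hc, ih (fun d hd => hw d (by simp [hd]))]
lemma main_lemma : ∀ (n : Nat) (cs : List Char), cs.length ≤ n →
    (loopA cs false true).2 = goB (mySplit cs) := by
  intro n
  induction n with
  | zero =>
    intro cs hcs
    have : cs = [] := List.eq_nil_of_length_eq_zero (by omega)
    subst this; rfl
  | succ n ih =>
    intro cs hcs
    obtain ⟨w, hwdef⟩ : ∃ w, w = cs.takeWhile (fun c => !(c = ' ')) := ⟨_, rfl⟩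
    obtain ⟨r, hrdef⟩ : ∃ r, r = cs.dropWhile (fun c => !(c = ' ')) := ⟨_, rfl⟩
    have hdecomp : w ++ r = cs := by
      rw [hwdef, hrdef]; exact List.takeWhile_append_dropWhile
    have hw : ∀ c ∈ w, c ≠ ' ' := by
      intro c hcw
      rw [hwdef] at hcw
      simpa using List.mem_takeWhile_imp hcw
    cases hr : r with
    | nil =>
      have hcw : cs = w := by rw [← hdecomp, hr, List.append_nil]
      rw [hcw, mySplit_spacefree w hw]
      cases w with
      | nil => rfl
      | cons c w' =>
        have hc : c ≠ ' ' := hw c (by simp)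
        simp only [loopA, goB]
        rw [show (decide (c = ' ')) = false by simp [hc], if_neg hc]
        rw [loopA_spacefree w' (fun d hd => hw d (by simp [hd]))]
        by_cases hok : (c = 'a' ∨ c = 'A') <;> simp [hok]
    | cons d r' =>
      have hd : d = ' ' := by
        have := dropWhile_head_false cs d r' (hrdef.symm.trans hr)
        simpa using this
      subst hd
      have hcw : cs = w ++ ' ' :: r' := by rw [← hdecomp, hr]
      have hlen : r'.length ≤ n := by
        rw [hcw] at hcs; simp at hcs; omega
      rw [hcw, mySplit_append w r' hw]
      cases hm : mySplit r' with
      | nil => exact absurd hm (mySplit_ne_nil r')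
      | cons t ts =>
        have hIH := ih r' hlen
        rw [hm] at hIH
        cases w with
        | nil =>
          simp only [List.nil_append, loopA, goB]
          simp [hIH, goB]
        | cons c w' =>
          have hc : c ≠ ' ' := hw c (by simp)
          simp only [List.cons_append, loopA, goB]
          rw [show (decide (c = ' ')) = false by simp [hc], if_neg hc]
          rw [loopA_word w' (fun e he => hw e (by simp [he]))]
          simp only [loopA]
          by_cases hok : (c = 'a' ∨ c = 'A') <;> simp [hok, hIH, goB]

-- ===== VERDICT (by name: the statement is the Claim_ definition above) =====
theorem palA_spec : Claim_equal_palA := by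
  intro cadena _
  unfold Spec_palA palA palA_alt
  rw [splitOn_eq_mySplit]
  have h := bridge cadena.toList 0 (Nat.zero_le _) false []
  simp only [Nat.cast_zero] at h
  simp only [h]
  have : pPrev cadena.toList 0 = true := rfl
  rw [this, List.drop_zero, List.nil_append,
    main_lemma cadena.toList.length cadena.toList le_rfl]
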